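-- pv_equiv track=rewrite | github.com/Teatot/AdventOfCode | Y_2023/day_eighteen/day_eighteen_task_2.py | compute_vertices
-- ===== SOURCE A (Python) =====
-- def compute_vertices(instruct):  # Left and Up - Negative (Coordinate System)
--     cur_x, cur_y = 0, 0
--     vertices = []
--     for direct, val in instruct:
--         if direct == "R":
--             cur_y += val
--         elif direct == "L":
--             cur_y -= val
--         elif direct == "U":
--             cur_x += val
--         elif direct == "D":
--             cur_x -= val
--         vertices.append((cur_x, cur_y))
--     return vertices
-- ===== SOURCE B (Python) =====
-- def _prefix_sums(nums):
--     total = 0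
--     out = []
--     for n in nums:
--         total += n
--         out.append(total)
--     return out
--
--
-- def compute_vertices(instruct):  # Left and Up - Negative (Coordinate System)
--     # Decompose into two independent 1-D problems: the x-coordinate only
--     # depends on U/D moves, the y-coordinate only on R/L moves.
--     dx = [v if d == "U" else -v if d == "D" else 0 for d, v in instruct]
--     dy = [v if d == "R" else -v if d == "L" else 0 for d, v in instruct]
--     return list(zip(_prefix_sums(dx), _prefix_sums(dy)))
-- ===== Notes on version B (the rewrite author's own statement) =====
-- stated objective: alternative
-- what changed: Instead of one pass threading a (x,y) pair through an if/elif chain, B decomposes the problem into two independent 1-D delta streams (x from U/D, y from R/L), prefix-sums each stream separately, and zips the two coordinate sequences.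
import Mathlib
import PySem

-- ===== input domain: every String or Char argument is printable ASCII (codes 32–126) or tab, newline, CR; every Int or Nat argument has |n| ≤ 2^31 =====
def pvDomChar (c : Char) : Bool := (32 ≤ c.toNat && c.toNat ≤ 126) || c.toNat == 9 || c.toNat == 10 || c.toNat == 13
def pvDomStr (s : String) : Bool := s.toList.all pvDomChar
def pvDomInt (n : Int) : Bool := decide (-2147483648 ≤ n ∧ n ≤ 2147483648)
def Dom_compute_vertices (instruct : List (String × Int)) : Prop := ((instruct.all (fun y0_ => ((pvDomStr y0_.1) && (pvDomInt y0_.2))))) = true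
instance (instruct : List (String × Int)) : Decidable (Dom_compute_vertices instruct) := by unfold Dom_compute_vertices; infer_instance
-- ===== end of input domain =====

-- B decomposes the task into two independent 1-D prefix-sum passes (x from U/D, y from R/L) zipped together; return values proved equal on all inputs.

-- ===== PORT A =====
-- loop body of A: branch chain updating (cur_x, cur_y), then append the pair
def pvStepA (s : (Int × Int) × List (Int × Int)) (dv : String × Int) :
    (Int × Int) × List (Int × Int) :=
  let p :=
    if dv.1 = "R" then (s.1.1, s.1.2 + dv.2)
    else if dv.1 = "L" then (s.1.1, s.1.2 - dv.2)
    else if dv.1 = "U" then (s.1.1 + dv.2, s.1.2)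
    else if dv.1 = "D" then (s.1.1 - dv.2, s.1.2)
    else s.1
  (p, s.2 ++ [p])

def compute_vertices (instruct : List (String × Int)) : List (Int × Int) :=
  (instruct.foldl pvStepA (((0 : Int), (0 : Int)), [])).2

-- ===== PORT B =====
-- helper _prefix_sums of Source B: running total with an output accumulator
def pvPrefixSums (nums : List Int) : List Int :=
  (nums.foldl (fun s n => (s.1 + n, s.2 ++ [s.1 + n])) ((0 : Int), ([] : List Int))).2

-- the two conditional expressions of Source B's comprehensions
def pvDX (dv : String × Int) : Int :=
  if dv.1 = "U" then dv.2 else if dv.1 = "D" then -dv.2 else 0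

def pvDY (dv : String × Int) : Int :=
  if dv.1 = "R" then dv.2 else if dv.1 = "L" then -dv.2 else 0

def compute_vertices_alt (instruct : List (String × Int)) : List (Int × Int) :=
  List.zip (pvPrefixSums (instruct.map pvDX)) (pvPrefixSums (instruct.map pvDY))

-- ===== PRECONDITION & SPEC =====
def Spec_compute_vertices (instruct : List (String × Int)) (out : List (Int × Int)) : Prop := out = compute_vertices_alt instruct
instance (instruct : List (String × Int)) (out : List (Int × Int)) : Decidable (Spec_compute_vertices instruct out) := by unfold Spec_compute_vertices; infer_instance

-- ===== CLAIM (what is proved, stated in full; the proofs are below) =====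
def Claim_equal_compute_vertices : Prop := ∀ (instruct : List (String × Int)), Dom_compute_vertices instruct → Spec_compute_vertices instruct (compute_vertices instruct)

-- ===== LEMMAS AND PROOFS =====
-- functional form of a prefix sum starting at t (proof-only helper)
def pvPref (t : Int) : List Int → List Int
  | [] => []
  | n :: rest => (t + n) :: pvPref (t + n) rest

-- the fold inside pvPrefixSums computes pvPref
lemma pvPrefixSums_fold (nums : List Int) (t : Int) (acc : List Int) :
    (nums.foldl (fun s n => (s.1 + n, s.2 ++ [s.1 + n])) (t, acc)).2 = acc ++ pvPref t nums := by
  induction nums generalizing t acc with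
  | nil => simp [pvPref]
  | cons n rest ih => simp [List.foldl, pvPref, ih]

lemma pvPrefixSums_eq (nums : List Int) : pvPrefixSums nums = pvPref 0 nums := by
  simp [pvPrefixSums, pvPrefixSums_fold]

-- A's fold, from an arbitrary state, produces the zip of the two shifted prefix sums
lemma pvFoldA_eq (l : List (String × Int)) (x y : Int) (acc : List (Int × Int)) :
    (l.foldl pvStepA ((x, y), acc)).2 =
      acc ++ List.zip (pvPref x (l.map pvDX)) (pvPref y (l.map pvDY)) := by
  induction l generalizing x y acc with
  | nil => simp [pvPref]
  | cons dv rest ih =>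
    have hp :
        (if dv.1 = "R" then (x, y + dv.2)
         else if dv.1 = "L" then (x, y - dv.2)
         else if dv.1 = "U" then (x + dv.2, y)
         else if dv.1 = "D" then (x - dv.2, y)
         else (x, y)) = (x + pvDX dv, y + pvDY dv) := by
      unfold pvDX pvDY
      by_cases hR : dv.1 = "R" <;> by_cases hL : dv.1 = "L" <;>
        by_cases hU : dv.1 = "U" <;> by_cases hD : dv.1 = "D" <;>
        simp_all [sub_eq_add_neg]
    simp only [List.foldl, List.map, pvPref, List.zip_cons_cons]
    rw [show pvStepA ((x, y), acc) dv = ((x + pvDX dv, y + pvDY dv), acc ++ [(x + pvDX dv, y + pvDY dv)]) by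
      simp [pvStepA, hp]]
    rw [ih]
    simp

-- ===== VERDICT (by name: the statement is the Claim_ definition above) =====
theorem compute_vertices_spec : Claim_equal_compute_vertices := by
  intro instruct _
  unfold Spec_compute_vertices compute_vertices compute_vertices_alt
  rw [pvFoldA_eq, pvPrefixSums_eq, pvPrefixSums_eq]
  simp
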